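-- pv_equiv track=rewrite | github.com/aneeshkozhinjalthodi/LearningAndDevelopment | DSA/binary_search.py | solve
-- ===== SOURCE A (Python) =====
-- def solve(A, B):
--     def get_upper(A, low, high, x):
--         if high >= low:
--             mid = (low+high) // 2
--             if A[mid] == x:
--                 return get_upper(A, mid+1, high, x)
--             elif A[mid] > x:
--                 return mid-1
--             else:
--                 return get_upper(A, low, mid-1, x)
--         else:
--             return -1
--
--     for i in range(1, len(A)):
--         A[i] = A[i]+A[i-1]
--     for j in A:
--         k = get_upper(B, 0, len(B), j)
--     return k
-- ===== SOURCE B (Python) =====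
-- def solve(A, B):
--     # One pass to total A (the last running prefix sum), then a single
--     # iterative binary search on B for that total.  (Does not mutate A,
--     # unlike the original, which overwrites A with its prefix sums.)
--     total = sum(A)
--     low, high = 0, len(B)
--     while high >= low:
--         mid = (low + high) // 2
--         v = B[mid]
--         if v == total:
--             low = mid + 1
--         elif v > total:
--             return mid - 1
--         else:
--             high = mid - 1
--     return -1
-- ===== Notes on version B (the rewrite author's own statement) =====
-- stated objective: faster
-- what changed: A overwrites A with its prefix sums and runs a recursive binary search on B for every prefix sum, keeping only the last result; B sums A once and runs a single iterative binary search on B for that total.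
import Mathlib
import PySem

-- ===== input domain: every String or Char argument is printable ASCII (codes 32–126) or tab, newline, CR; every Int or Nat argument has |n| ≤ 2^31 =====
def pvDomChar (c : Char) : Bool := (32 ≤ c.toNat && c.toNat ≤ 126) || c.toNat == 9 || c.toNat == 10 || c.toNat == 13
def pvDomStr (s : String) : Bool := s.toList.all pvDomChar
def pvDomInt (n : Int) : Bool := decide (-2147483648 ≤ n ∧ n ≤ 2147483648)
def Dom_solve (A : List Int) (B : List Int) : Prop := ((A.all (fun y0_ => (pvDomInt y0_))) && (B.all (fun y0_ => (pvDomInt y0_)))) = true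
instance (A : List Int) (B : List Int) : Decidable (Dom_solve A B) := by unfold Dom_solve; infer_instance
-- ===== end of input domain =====

-- B replaces A's per-prefix recursive binary searches by one sum and one iterative search
-- (faster); the return-value equivalence is proved — note A mutates its first argument
-- (overwrites it with prefix sums) while B does not.

-- ===== PORT A =====
-- get_upper, A's recursive binary search; `none` = IndexError (B[mid] out of range).
-- `fuel` only makes the recursion structural; fuel ≥ (high+1-low).toNat+1 never runs out.
def getUpper (B : List Int) (fuel : Nat) (low high x : Int) : Option Int :=
  match fuel with
  | 0 => none
  | fuel + 1 =>
    if high ≥ low then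
      let mid := PySem.Int.floordiv (low + high) 2
      match PySem.List.pyGet? B mid with
      | none => none
      | some v =>
        if v = x then getUpper B fuel (mid + 1) high x
        else if v > x then some (mid - 1)
        else getUpper B fuel low (mid - 1) x
    else some (-1)

def solve (A : List Int) (B : List Int) : Int :=
  -- for i in range(1, len(A)): A[i] = A[i] + A[i-1]   (in-place prefix sums)
  let A' := (PySem.List.pyRange 1 (A.length : Int) 1).foldl
      (fun l i => PySem.List.pySetD l i (PySem.List.pyGetD l i 0 + PySem.List.pyGetD l (i - 1) 0)) A
  -- for j in A: k = get_upper(B, 0, len(B), j)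
  -- acc: none = k not yet assigned, some none = a call raised, some (some v) = k = v
  let k := A'.foldl
      (fun acc j => match acc with
        | some none => some none
        | _ => some (getUpper B (B.length + 2) 0 (B.length : Int) j)) (none : Option (Option Int))
  match k with
  | some (some v) => v
  | _ => 0  -- Python raised (UnboundLocalError / IndexError); excluded by Pre_solve

-- ===== PORT B =====
-- the while loop of Source B as a tail recursion; `none` = IndexError, fuel as above
def searchFrom (B : List Int) (total : Int) (fuel : Nat) (low high : Int) : Option Int :=
  match fuel with
  | 0 => none
  | fuel + 1 =>
    if high ≥ low then
      let mid := PySem.Int.floordiv (low + high) 2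
      match PySem.List.pyGet? B mid with
      | none => none
      | some v =>
        if v = total then searchFrom B total fuel (mid + 1) high
        else if v > total then some (mid - 1)
        else searchFrom B total fuel low (mid - 1)
    else some (-1)

def solve_alt (A : List Int) (B : List Int) : Int :=
  (searchFrom B A.sum (B.length + 2) 0 (B.length : Int)).getD 0

-- ===== PRECONDITION & SPEC =====
-- `true` iff get_upper(B, 0, len(B), x) raises IndexError: the search can only run past the
-- end of B along the rightmost index chain n - (n+1)/2^(j+1), and does so iff B equals x at
-- every in-range index of that chain (closed form in len B; no search is replayed).
def chainAll (B : List Int) (x : Int) : Bool :=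
  (List.range (B.length + 1)).all (fun j => decide
    (1 ≤ (B.length + 1) / 2 ^ (j + 1) →
      B.getD (B.length - (B.length + 1) / 2 ^ (j + 1)) 0 = x))

-- the running prefix sums of a list
def psums : List Int → Int → List Int
  | [], _ => []
  | a :: t, acc => (acc + a) :: psums t (acc + a)

-- Pre_solve holds exactly where Python A returns: A nonempty (else UnboundLocalError on k)
-- and no running prefix total makes the search index past the end of B (else IndexError).
def Pre_solve (A : List Int) (B : List Int) : Prop :=
  A ≠ [] ∧ ∀ s ∈ psums A 0, chainAll B s = false
instance (A : List Int) (B : List Int) : Decidable (Pre_solve A B) := by unfold Pre_solve; infer_instance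

def pvWitness_solve : List Int × List Int := ([1], [3])

def Spec_solve (A : List Int) (B : List Int) (out : Int) : Prop := out = solve_alt A B
instance (A : List Int) (B : List Int) (out : Int) : Decidable (Spec_solve A B out) := by unfold Spec_solve; infer_instance

-- ===== CLAIM (what is proved, stated in full; the proofs are below) =====
def Claim_equal_solve : Prop := ∀ (A : List Int) (B : List Int), Dom_solve A B → Pre_solve A B → Spec_solve A B (solve A B)

-- ===== LEMMAS AND PROOFS =====

-- the two search routines are the same computation
theorem getUpper_eq_searchFrom (B : List Int) (x : Int) :
    ∀ (fuel : Nat) (low high : Int), getUpper B fuel low high x = searchFrom B x fuel low high := by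
  intro fuel
  induction fuel with
  | zero => intro low high; simp [getUpper, searchFrom]
  | succ fuel ih =>
    intro low high
    simp only [getUpper, searchFrom]
    split
    · cases h : PySem.List.pyGet? B (PySem.Int.floordiv (low + high) 2) with
      | none => rfl
      | some v => simp only [ih]
    · rfl

-- once high < len B (and 0 ≤ low), get_upper cannot raise
theorem getUpper_ne_none (B : List Int) (x : Int) :
    ∀ (fuel : Nat) (low high : Int), (high + 1 - low).toNat < fuel → 0 ≤ low →
      high < (B.length : Int) → getUpper B fuel low high x ≠ none := by
  intro fuel
  induction fuel with
  | zero => intro low high hf; omega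
  | succ fuel ih =>
    intro low high hf hlow hhigh
    simp only [getUpper]
    split
    · rename_i hge
      have hmid := PySem.Int.floordiv_two_mid_bounds (show low ≤ high by omega)
      have h1 : (0:Int) ≤ PySem.Int.floordiv (low + high) 2 := by omega
      have h2 : PySem.Int.floordiv (low + high) 2 < (B.length : Int) := by omega
      rw [PySem.List.pyGet?_eq_some_getElem B h1 h2]
      simp only []
      split
      · exact ih (PySem.Int.floordiv (low + high) 2 + 1) high (by omega) (by omega) hhigh
      · split
        · simp
        · exact ih low (PySem.Int.floordiv (low + high) 2 - 1) (by omega) hlow (by omega)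
    · simp

-- raise characterisation at the top level high = len B: get_upper raises iff B equals x at
-- every in-range index of the rightmost chain n - (n+1-l)/2^(j+1)
theorem getUpper_none_iff (B : List Int) (x : Int) :
    ∀ (fuel : Nat) (l : Nat), l ≤ B.length → B.length + 1 - l < fuel →
      (getUpper B fuel (l : Int) (B.length : Int) x = none ↔
        ∀ j : Nat, 1 ≤ (B.length + 1 - l) / 2 ^ (j + 1) →
          B.getD (B.length - (B.length + 1 - l) / 2 ^ (j + 1)) 0 = x) := by
  intro fuel
  induction fuel with
  | zero => intro l hl hf; omega
  | succ fuel ih =>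
    intro l hl hf
    have hge : ((l : Int) : Int) ≤ (B.length : Int) := by exact_mod_cast hl
    have hmid : PySem.Int.floordiv ((l : Int) + (B.length : Int)) 2 = (((l + B.length) / 2 : Nat) : Int) := by
      rw [show ((l : Int) + (B.length : Int)) = ((l + B.length : Nat) : Int) by push_cast; ring]
      exact_mod_cast PySem.Int.floordiv_natCast (l + B.length) 2
    simp only [getUpper, if_pos hge, hmid]
    have hshift : ∀ j : Nat, (B.length + 1 - l) / 2 ^ (j + 2)
        = (B.length + 1 - (l + B.length) / 2 - 1) / 2 ^ (j + 1) := by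
      intro j
      have h1 : (B.length + 1 - l) / 2 = B.length + 1 - (l + B.length) / 2 - 1 := by omega
      have h2 : (2 : Nat) ^ (j + 2) = 2 * 2 ^ (j + 1) := by ring
      rw [h2, ← Nat.div_div_eq_div_mul, h1]
    have he0 : (B.length + 1 - l) / 2 ^ 1 = B.length - (l + B.length) / 2 := by omega
    by_cases hmn : (l + B.length) / 2 < B.length
    · rw [PySem.List.pyGet?_natCast, List.getElem?_eq_getElem hmn]
      simp only []
      have he0pos : 1 ≤ (B.length + 1 - l) / 2 ^ 1 := by omega
      by_cases heq : B[(l + B.length) / 2] = x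
      · rw [if_pos heq]
        rw [show (((l + B.length) / 2 : Nat) : Int) + 1 = (((l + B.length) / 2 + 1 : Nat) : Int) by push_cast; ring]
        rw [ih ((l + B.length) / 2 + 1) (by omega) (by omega)]
        simp only [show B.length + 1 - ((l + B.length) / 2 + 1)
          = B.length + 1 - (l + B.length) / 2 - 1 by omega]
        constructor
        · intro h j
          cases j with
          | zero =>
            intro _
            rw [he0, show B.length - (B.length - (l + B.length) / 2) = (l + B.length) / 2 by omega,
              List.getD_eq_getElem B 0 hmn]
            exact heq
          | succ j =>
            rw [show j + 1 + 1 = j + 2 by omega, hshift j]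
            exact h j
        · intro h j hpos
          have := h (j + 1)
          rw [show j + 1 + 1 = j + 2 by omega, hshift j] at this
          exact this hpos
      · rw [if_neg heq]
        have hrhsF : ¬ (∀ j : Nat, 1 ≤ (B.length + 1 - l) / 2 ^ (j + 1) →
            B.getD (B.length - (B.length + 1 - l) / 2 ^ (j + 1)) 0 = x) := by
          intro h
          have := h 0 he0pos
          rw [he0, show B.length - (B.length - (l + B.length) / 2) = (l + B.length) / 2 by omega,
            List.getD_eq_getElem B 0 hmn] at this
          exact heq this
        by_cases hgt : B[(l + B.length) / 2] > x
        · rw [if_pos hgt]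
          constructor
          · intro hn; exact absurd hn (by simp)
          · intro hall; exact absurd hall hrhsF
        · rw [if_neg hgt]
          have hne := getUpper_ne_none B x fuel (l : Int) ((((l + B.length) / 2 : Nat) : Int) - 1)
            (by omega) (by omega) (by omega)
          constructor
          · intro hn; exact absurd hn hne
          · intro hall; exact absurd hall hrhsF
    · have hlm : l = B.length := by omega
      have hmn' : (l + B.length) / 2 = B.length := by omega
      rw [hmn']
      have hnone : PySem.List.pyGet? B ((B.length : Nat) : Int) = none := by
        rw [PySem.List.pyGet?_natCast]
        simp
      rw [hnone]
      have hvac : ∀ j : Nat, (B.length + 1 - l) / 2 ^ (j + 1) = 0 := by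
        intro j
        have : B.length + 1 - l = 1 := by omega
        rw [this]
        exact Nat.div_eq_of_lt (Nat.one_lt_two_pow (by omega))
      simp [hvac]

-- chainAll quantifies j only up to len B; larger j are vacuous
theorem chainAll_iff (B : List Int) (x : Int) :
    chainAll B x = true ↔ ∀ j : Nat, 1 ≤ (B.length + 1) / 2 ^ (j + 1) →
      B.getD (B.length - (B.length + 1) / 2 ^ (j + 1)) 0 = x := by
  unfold chainAll
  simp only [List.all_eq_true, List.mem_range, decide_eq_true_eq]
  constructor
  · intro h j hpos
    by_cases hj : j < B.length + 1
    · exact h j hj hpos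
    · exfalso
      have : B.length + 1 < 2 ^ (j + 1) :=
        lt_of_le_of_lt (by omega) (Nat.lt_two_pow_self)
      rw [Nat.div_eq_of_lt this] at hpos
      omega
  · exact fun h j _ => h j

-- loop invariant for A's in-place prefix-sum loop
theorem prefixInv : ∀ (k : Nat) (l : List Int) (i : Nat), 1 ≤ i → i + k = l.length →
    (PySem.List.pyRange (i : Int) (l.length : Int) 1).foldl
      (fun l i => PySem.List.pySetD l i (PySem.List.pyGetD l i 0 + PySem.List.pyGetD l (i - 1) 0)) l
      = l.take i ++ psums (l.drop i) (l.getD (i - 1) 0) := by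
  intro k
  induction k with
  | zero =>
    intro l i h1 hlen
    rw [show (l.length : Int) = (i : Int) by omega, PySem.List.pyRange_one_eq_nil (by omega)]
    simp [psums, show i = l.length by omega]
  | succ k ih =>
    intro l i h1 hlen
    have hi : i < l.length := by omega
    rw [PySem.List.pyRange_one_cons (by exact_mod_cast hi), List.foldl_cons]
    have hsub : ((i : Int) - 1) = ((i - 1 : Nat) : Int) := by omega
    have hstep : PySem.List.pySetD l (i : Int) (PySem.List.pyGetD l (i : Int) 0 + PySem.List.pyGetD l ((i : Int) - 1) 0)
        = l.set i (l.getD i 0 + l.getD (i - 1) 0) := by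
      rw [hsub, PySem.List.pySetD_natCast, PySem.List.pyGetD_natCast, PySem.List.pyGetD_natCast]
    rw [hstep]
    set v := l.getD i 0 + l.getD (i - 1) 0 with hv
    have hlen' : (l.set i v).length = l.length := by simp
    have h2 := ih (l.set i v) (i + 1) (by omega) (by simp; omega)
    rw [show ((i : Int) + 1) = ((i + 1 : Nat) : Int) by push_cast; ring,
      show (l.length : Int) = ((l.set i v).length : Int) by rw [hlen']]
    rw [h2]
    -- reconcile both sides
    have htake : (l.set i v).take (i + 1) = l.take i ++ [v] := by
      rw [List.set_eq_take_append_cons_drop, if_pos hi]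
      rw [List.take_append]
      simp [List.length_take, Nat.min_eq_left (le_of_lt hi), show i + 1 - i = 1 by omega]
    have hdrop : (l.set i v).drop (i + 1) = l.drop (i + 1) := by
      rw [List.drop_set, if_pos (by omega)]
    have hgetD : (l.set i v).getD (i + 1 - 1) 0 = v := by
      simp [show i + 1 - 1 = i by omega, List.getD, hi]
    rw [htake, hdrop, hgetD]
    have hdropi : l.drop i = l[i] :: l.drop (i + 1) := List.drop_eq_getElem_cons hi
    rw [hdropi]
    have hvi : l[i - 1]?.getD 0 + l[i] = v := by
      rw [hv, List.getD_eq_getElem l 0 hi]; simp [List.getD]; ring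
    simp [psums, List.append_assoc, hvi]

-- the in-place prefix-sum loop computes psums
theorem prefixLoop_eq_psums (A : List Int) :
    (PySem.List.pyRange 1 (A.length : Int) 1).foldl
      (fun l i => PySem.List.pySetD l i (PySem.List.pyGetD l i 0 + PySem.List.pyGetD l (i - 1) 0)) A
      = psums A 0 := by
  cases A with
  | nil => simp [psums, PySem.List.pyRange_one_eq_nil]
  | cons a t =>
    have h := prefixInv (t.length) (a :: t) 1 (by omega) (by simp [Nat.add_comm])
    rw [show ((1:Nat) : Int) = (1 : Int) by norm_cast] at h
    rw [h]
    simp [psums]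

theorem getLastD_psums (l : List Int) (h : l ≠ []) :
    ∀ (acc d : Int), (psums l acc).getLastD d = acc + l.sum := by
  induction l with
  | nil => simp at h
  | cons a t ih =>
    intro acc d
    cases t with
    | nil => simp [psums]
    | cons b u =>
      rw [show psums (a :: b :: u) acc = (acc + a) :: psums (b :: u) (acc + a) from rfl,
        List.getLastD_cons, ih (by simp) (acc + a) (acc + a)]
      simp; ring

theorem psums_ne_nil (l : List Int) (acc : Int) (h : l ≠ []) : psums l acc ≠ [] := by
  cases l with
  | nil => simp at h
  | cons a t => simp [psums]

-- the k-loop returns the last call's value when no call raises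
theorem foldl_k_loop (g : Int → Option Int) :
    ∀ (l : List Int) (acc : Option (Option Int)), (acc = none ∨ ∃ v, acc = some (some v)) →
      (∀ x ∈ l, g x ≠ none) → l ≠ [] → ∀ (d : Int),
      l.foldl (fun acc j => match acc with
        | some none => some none
        | _ => some (g j)) acc = some (g (l.getLastD d)) := by
  intro l
  induction l with
  | nil => intro _ _ _ h; simp at h
  | cons a t ih =>
    intro acc hacc hok _ d
    have hga : g a ≠ none := hok a (by simp)
    have hfold : (a :: t).foldl (fun acc j => match acc with
        | some none => some none
        | _ => some (g j)) acc = t.foldl (fun acc j => match acc with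
        | some none => some none
        | _ => some (g j)) (some (g a)) := by
      rcases hacc with rfl | ⟨v, rfl⟩ <;> rfl
    cases t with
    | nil => rw [hfold]; rfl
    | cons b u =>
      rw [hfold, List.getLastD_cons]
      exact ih (some (g a)) (Or.inr (by cases hg : g a with
        | none => exact absurd hg hga
        | some v => exact ⟨v, by simp⟩)) (fun x hx => hok x (by simp [hx])) (by simp) a

-- ===== VERDICT (by name: the statement is the Claim_ definition above) =====
-- the last element of a nonempty list (getLastD form) is a member
theorem getLastD_mem (l : List Int) (h : l ≠ []) : ∀ (d : Int), l.getLastD d ∈ l := by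
  induction l with
  | nil => simp at h
  | cons a t ih =>
    intro d
    rw [List.getLastD_cons]
    cases t with
    | nil => simp
    | cons b u => exact List.mem_cons_of_mem a (ih (by simp) a)

theorem solve_spec : Claim_equal_solve := by
  intro A B _ hpre
  obtain ⟨hA, hs⟩ := hpre
  show solve A B = solve_alt A B
  have hok : ∀ j ∈ psums A 0, getUpper B (B.length + 2) 0 (B.length : Int) j ≠ none := by
    intro j hj hnone
    have hiff := getUpper_none_iff B j (B.length + 2) 0 (Nat.zero_le _) (by omega)
    rw [Nat.cast_zero] at hiff
    have hch : chainAll B j = true := by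
      rw [chainAll_iff]
      have := hiff.mp hnone
      simpa using this
    rw [hs j hj] at hch
    exact absurd hch (by simp)
  have hk := foldl_k_loop (fun j => getUpper B (B.length + 2) 0 (B.length : Int) j)
    (psums A 0) none (Or.inl rfl) hok (psums_ne_nil A 0 hA) 0
  have hlast : (psums A 0).getLastD 0 = A.sum := by
    rw [getLastD_psums A hA 0 0]; ring
  rw [hlast] at hk
  have hsum_mem : A.sum ∈ psums A 0 := by
    rw [← hlast]; exact getLastD_mem _ (psums_ne_nil A 0 hA) 0
  cases hgu : getUpper B (B.length + 2) 0 (B.length : Int) A.sum with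
  | none => exact absurd hgu (hok A.sum hsum_mem)
  | some v =>
    rw [hgu] at hk
    unfold solve solve_alt
    rw [prefixLoop_eq_psums]
    change (match List.foldl (fun acc j => match acc with
        | some none => some none
        | _ => some (getUpper B (B.length + 2) 0 (B.length : Int) j)) none (psums A 0) with
      | some (some v) => v
      | _ => 0) = (searchFrom B A.sum (B.length + 2) 0 (B.length : Int)).getD 0
    have hk2 : List.foldl (fun acc j => match acc with
        | some none => some none
        | _ => some (getUpper B (B.length + 2) 0 (B.length : Int) j)) none (psums A 0)
        = some (some v) := hk
    rw [hk2, ← getUpper_eq_searchFrom, hgu]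
    rfl
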